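-- pv_equiv track=rewrite | github.com/sidhikabalachandar/lig_clash_score | src/data/systematic_decoy_search.py | get_grid_groups
-- ===== SOURCE A (Python) =====
-- def get_grid_groups(grid_size, n):
--     grid = []
--     for dx in range(-grid_size, grid_size):
--         for dy in range(-grid_size, grid_size):
--             for dz in range(-grid_size, grid_size):
--                 grid.append([dx, dy, dz])
--
--     grouped_files = []
--
--     for i in range(0, len(grid), n):
--         grouped_files += [grid[i: i + n]]
--
--     return grouped_files
-- ===== SOURCE B (Python) =====
-- def get_grid_groups(grid_size, n):
--     # single fused pass: chunk points as they are generated (no intermediate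
--     # full grid, no slicing); chunk size must be positive, else no groups
--     if n <= 0:
--         return []
--     groups = []
--     chunk = []
--     for dx in range(-grid_size, grid_size):
--         for dy in range(-grid_size, grid_size):
--             for dz in range(-grid_size, grid_size):
--                 chunk.append([dx, dy, dz])
--                 if len(chunk) == n:
--                     groups.append(chunk)
--                     chunk = []
--     if chunk:
--         groups.append(chunk)
--     return groups
-- ===== Notes on version B (the rewrite author's own statement) =====
-- stated objective: alternative
-- what changed: B fuses grid construction and grouping into one pass that accumulates a running chunk and flushes it at size n, instead of materialising the full grid list and then slicing it by index ranges.
import Mathlib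
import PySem

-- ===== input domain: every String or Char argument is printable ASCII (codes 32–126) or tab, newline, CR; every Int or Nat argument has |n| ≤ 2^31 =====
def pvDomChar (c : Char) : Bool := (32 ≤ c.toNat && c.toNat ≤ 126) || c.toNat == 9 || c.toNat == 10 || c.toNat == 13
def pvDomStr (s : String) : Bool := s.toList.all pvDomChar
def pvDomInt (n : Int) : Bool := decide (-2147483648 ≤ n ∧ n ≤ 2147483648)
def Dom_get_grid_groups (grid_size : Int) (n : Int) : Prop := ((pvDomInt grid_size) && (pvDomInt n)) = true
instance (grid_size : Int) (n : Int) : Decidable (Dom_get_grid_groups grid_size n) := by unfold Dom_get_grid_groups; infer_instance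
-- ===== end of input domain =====

-- B fuses grid construction and grouping into one pass with a running chunk flushed at size n,
-- instead of building the full grid list and then slicing it by index ranges (alternative decomposition).


-- ===== PORT A =====
-- Python lists are dynamic arrays: 'grid.append(x)' is ported as 'Array.push' (exact, and O(1) like
-- CPython's append; a Lean 'List' rebuilt with '++ [x]' would be quadratic and unevaluable here).
-- 'grid[i : i+n]' is ported as 'Array.extract i.toNat (i+n).toNat': exact for the indices the loop
-- yields (range(0, len, n) is empty unless n > 0, and then every i satisfies 0 ≤ i, 0 < n; both
-- Python's slice and 'extract' clamp a past-the-end stop).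
def get_grid_groups (grid_size : Int) (n : Int) : List (List (List Int)) :=
  let grid : Array (List Int) :=
    (PySem.List.pyRange (-grid_size) grid_size 1).foldl (fun grid dx =>
      (PySem.List.pyRange (-grid_size) grid_size 1).foldl (fun grid dy =>
        (PySem.List.pyRange (-grid_size) grid_size 1).foldl (fun grid dz =>
          grid.push [dx, dy, dz]) grid) grid) #[]
  ((PySem.List.pyRange 0 (grid.size : Int) n).foldl
    (fun grouped_files i =>
      grouped_files.push ((grid.extract i.toNat (i + n).toNat).toList)) #[]).toList

-- ===== PORT B =====
-- 'append' on the two accumulators is again ported as 'Array.push' (exact, see port A's comment).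
def get_grid_groups_alt (grid_size : Int) (n : Int) : List (List (List Int)) :=
  if n ≤ 0 then []
  else
    let st :=
      (PySem.List.pyRange (-grid_size) grid_size 1).foldl (fun st dx =>
        (PySem.List.pyRange (-grid_size) grid_size 1).foldl (fun st dy =>
          (PySem.List.pyRange (-grid_size) grid_size 1).foldl (fun st dz =>
            let chunk := st.2.push [dx, dy, dz]
            if (chunk.size : Int) = n then (st.1.push chunk.toList, (#[] : Array (List Int)))
            else (st.1, chunk)) st) st)
        ((#[] : Array (List (List Int))), (#[] : Array (List Int)))
    if st.2.isEmpty then st.1.toList else (st.1.push st.2.toList).toList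

-- ===== PRECONDITION & SPEC =====
-- Pre_ excludes only n = 0, where Python A raises ValueError (range() step 0) and so returns no value.
def Pre_get_grid_groups (grid_size : Int) (n : Int) : Prop := n ≠ 0
instance (grid_size : Int) (n : Int) : Decidable (Pre_get_grid_groups grid_size n) := by unfold Pre_get_grid_groups; infer_instance
def pvWitness_get_grid_groups : Int × Int := (1, 2)

def Spec_get_grid_groups (grid_size : Int) (n : Int) (out : List (List (List Int))) : Prop := out = get_grid_groups_alt grid_size n
instance (grid_size : Int) (n : Int) (out : List (List (List Int))) : Decidable (Spec_get_grid_groups grid_size n out) := by unfold Spec_get_grid_groups; infer_instance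

-- ===== CLAIM (what is proved, stated in full; the proofs are below) =====
def Claim_equal_get_grid_groups : Prop := ∀ (grid_size : Int) (n : Int), Dom_get_grid_groups grid_size n → Pre_get_grid_groups grid_size n → Spec_get_grid_groups grid_size n (get_grid_groups grid_size n)
-- ===== LEMMAS AND PROOFS =====

-- the flat list of grid points, in generation order
def pvPts (g : Int) : List (List Int) :=
  (PySem.List.pyRange (-g) g 1).flatMap (fun dx =>
    (PySem.List.pyRange (-g) g 1).flatMap (fun dy =>
      (PySem.List.pyRange (-g) g 1).flatMap (fun dz => [[dx, dy, dz]])))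

-- B's per-point step (chunk size m+1)
def pvStepB (m : Nat) (st : Array (List (List Int)) × Array (List Int)) (p : List Int) :
    Array (List (List Int)) × Array (List Int) :=
  if (((st.2.push p).size : Nat) : Int) = (m : Int) + 1 then (st.1.push (st.2.push p).toList, #[])
  else (st.1, st.2.push p)

-- reference chunker: groups of size m+1, last group possibly short
def pvChunks {α : Type} (m : Nat) : List α → List (List α)
  | [] => []
  | x :: xs => ((x :: xs).take (m+1)) :: pvChunks m ((x :: xs).drop (m+1))
termination_by l => l.length
decreasing_by simp

lemma pvChunks_ne_nil {α : Type} (m : Nat) (l : List α) (h : l ≠ []) :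
    pvChunks m l = l.take (m+1) :: pvChunks m (l.drop (m+1)) := by
  cases l with
  | nil => exact absurd rfl h
  | cons x xs => rw [pvChunks.eq_def]

lemma pv_foldl_flatMap {α β σ : Type} (g : α → List β) (φ : σ → β → σ) (l : List α) (init : σ) :
    (l.flatMap g).foldl φ init = l.foldl (fun s x => (g x).foldl φ s) init := by
  induction l generalizing init with
  | nil => rfl
  | cons x xs ih => simp [List.foldl_append, ih]

lemma pv_foldl_triple {σ : Type} (r : List Int) (φ : σ → List Int → σ) (init : σ) :
    r.foldl (fun s dx => r.foldl (fun s dy => r.foldl (fun s dz => φ s [dx, dy, dz]) s) s) init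
      = ((r.flatMap fun dx => r.flatMap fun dy => r.flatMap fun dz => [[dx, dy, dz]])).foldl φ init := by
  simp only [pv_foldl_flatMap, List.foldl_cons, List.foldl_nil]

lemma pv_foldl_push {α : Type} (l : List α) (a : Array α) :
    (l.foldl (fun acc x => acc.push x) a).toList = a.toList ++ l := by
  induction l generalizing a with
  | nil => simp
  | cons x xs ih => simp

lemma pv_foldl_push_map {ι α : Type} (f : ι → α) (l : List ι) (a : Array α) :
    (l.foldl (fun acc i => acc.push (f i)) a).toList = a.toList ++ l.map f := by
  induction l generalizing a with
  | nil => simp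
  | cons x xs ih => simp

lemma pv_gridA (g : Int) :
    ((PySem.List.pyRange (-g) g 1).foldl (fun grid dx =>
      (PySem.List.pyRange (-g) g 1).foldl (fun grid dy =>
        (PySem.List.pyRange (-g) g 1).foldl (fun grid dz =>
          grid.push [dx, dy, dz]) grid) grid) #[]).toList = pvPts g := by
  have h := pv_foldl_triple (PySem.List.pyRange (-g) g 1)
    (fun (acc : Array (List Int)) p => acc.push p) #[]
  rw [h, pv_foldl_push]
  simp [pvPts]

lemma pv_pyRange_pos_nil (L s : Int) (hs : 0 < s) (hL : L ≤ 0) :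
    PySem.List.pyRange 0 L s = [] := by
  rw [PySem.List.pyRange_of_pos _ _ hs]
  simp [show ¬ ((0:Int) < L) by omega]

lemma pv_pyRange_neg_nil (a b s : Int) (hs : s < 0) (hab : a ≤ b) :
    PySem.List.pyRange a b s = [] := by
  simp [PySem.List.pyRange, show s ≠ 0 by omega, show ¬ (0:Int) < s by omega,
    show ¬ b < a by omega]

lemma pv_pyRange_pos_cons (L s : Int) (hs : 0 < s) (hL : 0 < L) :
    PySem.List.pyRange 0 L s = 0 :: (PySem.List.pyRange 0 (L - s) s).map (· + s) := by
  rw [PySem.List.pyRange_of_pos _ _ hs, PySem.List.pyRange_of_pos _ _ hs]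
  have hdiv : (L - 0 + s - 1) / s = (L - s - 0 + s - 1) / s + 1 := by
    have h1 : L - 0 + s - 1 = (L - s - 0 + s - 1) + 1 * s := by ring
    rw [h1, Int.add_mul_ediv_right _ _ (by omega : s ≠ 0)]
  by_cases hLs : 0 < L - s
  · have hq : 0 ≤ (L - s - 0 + s - 1) / s := Int.ediv_nonneg (by omega) (by omega)
    rw [if_pos hL, if_pos hLs, hdiv,
      show ((L - s - 0 + s - 1)/s + 1).toNat = ((L - s - 0 + s - 1)/s).toNat + 1 from by omega,
      List.range_succ_eq_map]
    simp only [List.map_cons, List.map_map]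
    refine congrArg₂ List.cons (by norm_num) (List.map_congr_left ?_)
    intro k _
    simp [Function.comp]
    ring
  · rw [if_pos hL, if_neg hLs]
    have h2 : (L - 0 + s - 1) / s = 1 := by
      have h1 : L - 0 + s - 1 = (L - 1) + 1 * s := by ring
      rw [h1, Int.add_mul_ediv_right _ _ (by omega : s ≠ 0),
        Int.ediv_eq_zero_of_lt (by omega) (by omega)]
      omega
    rw [h2]
    norm_num

lemma pv_slice_shift (l : List (List Int)) (i s : Int) (hi : 0 ≤ i) (hs : 0 < s) :
    PySem.List.slice l (some (i + s)) (some (i + s + s))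
      = PySem.List.slice (l.drop s.toNat) (some i) (some (i + s)) := by
  rw [PySem.List.slice_toNat _ (by omega) (by omega),
    PySem.List.slice_toNat _ (by omega) (by omega), List.drop_drop]
  rw [show s.toNat + i.toNat = (i + s).toNat from by omega,
    show (i + s).toNat - i.toNat = (i + s + s).toNat - (i + s).toNat from by omega]

lemma pv_chunkA_aux (m : Nat) : ∀ (L : Nat) (l : List (List Int)) (acc : List (List (List Int))),
    l.length = L →
    (PySem.List.pyRange 0 (l.length : Int) ((m : Int) + 1)).foldl
      (fun gf i => gf ++ [PySem.List.slice l (some i) (some (i + ((m : Int) + 1)))]) acc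
      = acc ++ pvChunks m l := by
  intro L
  induction L using Nat.strong_induction_on with
  | _ L IH =>
  intro l acc hL
  cases l with
  | nil =>
    rw [pv_pyRange_pos_nil _ _ (by omega) (by simp)]
    simp [pvChunks]
  | cons x xs =>
    have hs : (0:Int) < (m:Int) + 1 := by omega
    have hL0 : (0:Int) < (((x :: xs).length : Nat) : Int) := by simp
    rw [pv_pyRange_pos_cons _ _ hs hL0, List.foldl_cons]
    simp only [List.foldl_map]
    rw [PySem.List.foldl_congr_mem _ _
      (fun gf i => gf ++ [PySem.List.slice ((x :: xs).drop (m+1)) (some i) (some (i + ((m:Int)+1)))]) _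
      (by
        intro a i hi
        have h0i : 0 ≤ i := ((PySem.List.mem_pyRange_iff_of_pos hs i).mp hi).1
        simp only []
        rw [pv_slice_shift _ _ _ h0i hs,
          show ((m:Int)+1).toNat = m + 1 from by omega])]
    have hhead : PySem.List.slice (x :: xs) (some 0) (some (0 + ((m:Int)+1)))
        = (x :: xs).take (m+1) := by
      rw [PySem.List.slice_toNat _ (by omega) (by omega),
        show ((0:Int)).toNat = 0 from rfl,
        show ((0:Int) + ((m:Int)+1)).toNat = m + 1 from by omega]
      simp
    rw [hhead]
    by_cases hbig : (((x :: xs).length : Nat) : Int) - ((m:Int)+1) ≤ 0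
    · rw [pv_pyRange_pos_nil _ _ hs hbig, List.foldl_nil,
        pvChunks_ne_nil m _ (List.cons_ne_nil x xs),
        List.drop_eq_nil_of_le (by omega : (x :: xs).length ≤ m + 1)]
      simp [pvChunks]
    · have hlen : ((((x :: xs).drop (m+1)).length : Nat) : Int)
          = (((x :: xs).length : Nat) : Int) - ((m:Int)+1) := by
        rw [List.length_drop]
        omega
      rw [← hlen,
        IH ((x :: xs).drop (m+1)).length (by rw [List.length_drop]; omega) _ _ rfl,
        pvChunks_ne_nil m _ (List.cons_ne_nil x xs)]
      simp

lemma pv_chunkA (m : Nat) (l : List (List Int)) (acc : List (List (List Int))) :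
    (PySem.List.pyRange 0 (l.length : Int) ((m : Int) + 1)).foldl
      (fun gf i => gf ++ [PySem.List.slice l (some i) (some (i + ((m : Int) + 1)))]) acc
      = acc ++ pvChunks m l :=
  pv_chunkA_aux m l.length l acc rfl

lemma pv_chunkA_arr (m : Nat) (arr : Array (List Int)) :
    ((PySem.List.pyRange 0 (arr.size : Int) ((m : Int) + 1)).foldl
      (fun gf i => gf.push ((arr.extract i.toNat (i + ((m : Int) + 1)).toNat).toList)) #[]).toList
      = pvChunks m arr.toList := by
  have hs : (0:Int) < (m:Int) + 1 := by omega
  rw [pv_foldl_push_map]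
  have hcg : ∀ i ∈ PySem.List.pyRange 0 (arr.size : Int) ((m:Int)+1),
      (arr.extract i.toNat (i + ((m:Int)+1)).toNat).toList
        = PySem.List.slice arr.toList (some i) (some (i + ((m:Int)+1))) := by
    intro i hi
    have h0i : 0 ≤ i := ((PySem.List.mem_pyRange_iff_of_pos hs i).mp hi).1
    rw [PySem.List.slice_toNat _ h0i (by omega), Array.toList_extract,
      List.extract_eq_take_drop]
  rw [List.map_congr_left hcg,
    show ((arr.size : Nat) : Int) = ((arr.toList.length : Nat) : Int) from by
      rw [Array.length_toList]]
  have h := pv_chunkA m arr.toList ([] : List (List (List Int)))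
  rw [PySem.List.foldl_append_singleton_eq_map] at h
  simpa using h

lemma pv_chunkB (m : Nat) (l : List (List Int)) : ∀ (groups : Array (List (List Int)))
    (chunk : Array (List Int)), chunk.size < m + 1 →
    (if (l.foldl (pvStepB m) (groups, chunk)).2.isEmpty
     then (l.foldl (pvStepB m) (groups, chunk)).1.toList
     else ((l.foldl (pvStepB m) (groups, chunk)).1.push
        (l.foldl (pvStepB m) (groups, chunk)).2.toList).toList)
      = groups.toList ++ pvChunks m (chunk.toList ++ l) := by
  induction l with
  | nil =>
    intro groups chunk hc
    simp only [List.foldl_nil, List.append_nil]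
    cases htl : chunk.toList with
    | nil =>
      have he : chunk.isEmpty = true := by rw [← Array.isEmpty_toList, htl]; rfl
      rw [if_pos he]
      simp [pvChunks]
    | cons y ys =>
      have he : chunk.isEmpty = false := by rw [← Array.isEmpty_toList, htl]; rfl
      have hlen : (y :: ys).length < m + 1 := by
        rw [← htl, Array.length_toList]
        exact hc
      rw [if_neg (by simp [he]), Array.toList_push,
        pvChunks_ne_nil m (y :: ys) (List.cons_ne_nil y ys),
        List.take_of_length_le (by omega), List.drop_eq_nil_of_le (by omega)]
      simp [pvChunks]
  | cons p l ih =>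
    intro groups chunk hc
    simp only [List.foldl_cons]
    by_cases h : chunk.size + 1 = m + 1
    · have hcond : (((chunk.push p).size : Nat) : Int) = (m:Int) + 1 := by
        simp only [Array.size_push]
        omega
      rw [show pvStepB m (groups, chunk) p = (groups.push (chunk.push p).toList, #[]) from by
        simp only [pvStepB]; rw [if_pos hcond]]
      rw [ih _ _ (by simp)]
      rw [Array.toList_push, Array.toList_push]
      have hne : chunk.toList ++ p :: l ≠ [] := by simp
      rw [pvChunks_ne_nil m _ hne,
        show chunk.toList ++ p :: l = (chunk.toList ++ [p]) ++ l from by simp,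
        List.take_left' (by simp [Array.length_toList]; omega),
        List.drop_left' (by simp [Array.length_toList]; omega)]
      simp
    · have hcond : ¬ ((((chunk.push p).size : Nat) : Int) = (m:Int) + 1) := by
        simp only [Array.size_push]
        omega
      rw [show pvStepB m (groups, chunk) p = (groups, chunk.push p) from by
        simp only [pvStepB]; rw [if_neg hcond]]
      rw [ih _ _ (by simp [Array.size_push]; omega)]
      rw [Array.toList_push]
      simp

lemma pv_A_neg (g n : Int) (hn : n < 0) : get_grid_groups g n = [] := by
  simp only [get_grid_groups]
  rw [pv_pyRange_neg_nil _ _ _ hn (Int.natCast_nonneg _)]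
  rfl

lemma pv_altA (g : Int) (m : Nat) :
    get_grid_groups g ((m : Int) + 1) = pvChunks m (pvPts g) := by
  simp only [get_grid_groups]
  rw [pv_chunkA_arr m, pv_gridA g]

lemma pv_altB (g : Int) (m : Nat) :
    get_grid_groups_alt g ((m : Int) + 1) = pvChunks m (pvPts g) := by
  have hfold :
      (PySem.List.pyRange (-g) g 1).foldl (fun st dx =>
        (PySem.List.pyRange (-g) g 1).foldl (fun st dy =>
          (PySem.List.pyRange (-g) g 1).foldl (fun st dz =>
            if (((st.2.push [dx, dy, dz]).size : Nat) : Int) = (m:Int) + 1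
            then (st.1.push (st.2.push [dx, dy, dz]).toList, (#[] : Array (List Int)))
            else (st.1, st.2.push [dx, dy, dz])) st) st)
        ((#[] : Array (List (List Int))), (#[] : Array (List Int)))
      = (pvPts g).foldl (pvStepB m)
        ((#[] : Array (List (List Int))), (#[] : Array (List Int))) :=
    pv_foldl_triple _ (pvStepB m) _
  simp only [get_grid_groups_alt]
  rw [if_neg (by omega : ¬ ((m:Int) + 1 ≤ 0))]
  rw [hfold]
  rw [pv_chunkB m (pvPts g) #[] #[] (by simp)]
  simp

-- ===== VERDICT (by name: the statement is the Claim_ definition above) =====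
theorem get_grid_groups_spec : Claim_equal_get_grid_groups := by
  intro g n _ hpre
  unfold Spec_get_grid_groups
  rcases lt_or_gt_of_ne hpre with hneg | hpos
  · rw [pv_A_neg g n hneg]
    simp only [get_grid_groups_alt]
    rw [if_pos (by omega : n ≤ 0)]
  · obtain ⟨m, rfl⟩ : ∃ m : Nat, n = (m : Int) + 1 := ⟨(n - 1).toNat, by omega⟩
    rw [pv_altA, pv_altB]
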